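-- pv_equiv track=rewrite | github.com/jaedeokkim919-ai/querypilot | query_manager/services.py | split_queries
-- ===== SOURCE A (Python) =====
-- def split_queries(query_text: str) -> list:
--     """
--     세미콜론으로 구분된 쿼리를 분리
--     문자열 리터럴 내의 세미콜론은 무시
--     """
--     queries = []
--     current_query = []
--     in_string = False
--     string_char = None
--     i = 0
--
--     while i < len(query_text):
--         char = query_text[i]
--
--         # 문자열 시작/종료 체크
--         if char in ("'", '"') and (i == 0 or query_text[i-1] != '\\'):
--             if not in_string:
--                 in_string = True
--                 string_char = char
--             elif char == string_char:
--                 in_string = False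
--                 string_char = None
--
--         # 세미콜론 처리
--         if char == ';' and not in_string:
--             query = ''.join(current_query).strip()
--             if query:
--                 queries.append(query)
--             current_query = []
--         else:
--             current_query.append(char)
--
--         i += 1
--
--     # 마지막 쿼리 처리
--     query = ''.join(current_query).strip()
--     if query:
--         queries.append(query)
--
--     return queries
-- ===== SOURCE B (Python) =====
-- def split_queries(query_text: str) -> list:
--     """
--     Split semicolon-separated queries, ignoring semicolons inside string
--     literals; records split indices in one scan, then slices the segments.
--     """
--     cuts = []
--     in_string = False
--     string_char = None
--     for i, char in enumerate(query_text):
--         if char in ("'", '"') and (i == 0 or query_text[i-1] != '\\'):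
--             if not in_string:
--                 in_string = True
--                 string_char = char
--             elif char == string_char:
--                 in_string = False
--                 string_char = None
--         if char == ';' and not in_string:
--             cuts.append(i)
--     queries = []
--     prev = 0
--     for c in cuts + [len(query_text)]:
--         q = query_text[prev:c].strip()
--         if q:
--             queries.append(q)
--         prev = c + 1
--     return queries
-- ===== Notes on version B (the rewrite author's own statement) =====
-- stated objective: faster
-- what changed: B records the indices of real split semicolons during the single scan instead of accumulating a per-character buffer, then builds the result by slicing query_text between consecutive cut points and stripping each slice.
import Mathlib
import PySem

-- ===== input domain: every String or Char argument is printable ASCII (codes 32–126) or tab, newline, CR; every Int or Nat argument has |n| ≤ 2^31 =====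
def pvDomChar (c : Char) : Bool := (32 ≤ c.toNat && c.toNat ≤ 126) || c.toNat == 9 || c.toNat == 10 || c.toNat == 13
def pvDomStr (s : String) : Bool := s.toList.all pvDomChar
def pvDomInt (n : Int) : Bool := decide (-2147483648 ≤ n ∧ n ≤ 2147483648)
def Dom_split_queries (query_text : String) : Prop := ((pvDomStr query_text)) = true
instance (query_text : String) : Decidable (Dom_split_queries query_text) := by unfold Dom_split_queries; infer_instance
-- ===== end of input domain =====

-- B is an alternative decomposition: it records split-point indices during the scan and
-- slices the text afterwards, where A accumulates a character buffer; return values agree.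

-- ===== PORT A =====
-- the while-loop of A: state (prev char = query_text[i-1], in_string, string_char, current_query, queries)
def splitQueriesLoopA : List Char → Option Char → Bool → Option Char → List Char → List String → List String
  | [], _, _, _, cur, qs =>
      -- 마지막 쿼리 처리: query = ''.join(current_query).strip(); if query: queries.append(query)
      let q := PySem.Chars.strip cur
      if q ≠ [] then qs ++ [String.ofList q] else qs
  | c :: rest, prev, inS, sc, cur, qs =>
      let st : Bool × Option Char :=
        if (c = '\'' ∨ c = '"') ∧ (prev = none ∨ prev ≠ some '\\') then
          if !inS then (true, some c)
          else if some c = sc then (false, none)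
          else (inS, sc)
        else (inS, sc)
      if c = ';' ∧ !st.1 then
        let q := PySem.Chars.strip cur
        splitQueriesLoopA rest (some c) st.1 st.2 []
          (if q ≠ [] then qs ++ [String.ofList q] else qs)
      else
        splitQueriesLoopA rest (some c) st.1 st.2 (cur ++ [c]) qs

def split_queries (query_text : String) : List String :=
  splitQueriesLoopA query_text.toList none false none [] []

-- ===== PORT B =====
-- first pass of B: collect the indices of the splitting semicolons
def splitQueriesCutsB : List Char → Nat → Option Char → Bool → Option Char → List Nat
  | [], _, _, _, _ => []
  | c :: rest, i, prev, inS, sc =>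
      let st : Bool × Option Char :=
        if (c = '\'' ∨ c = '"') ∧ (prev = none ∨ prev ≠ some '\\') then
          if !inS then (true, some c)
          else if some c = sc then (false, none)
          else (inS, sc)
        else (inS, sc)
      if c = ';' ∧ !st.1 then
        i :: splitQueriesCutsB rest (i + 1) (some c) st.1 st.2
      else
        splitQueriesCutsB rest (i + 1) (some c) st.1 st.2

-- second pass of B: slice query_text[prev:c] for each cut point, strip, keep if nonempty
def splitQueriesBuildB (cs : List Char) : Nat → List Nat → List String
  | _, [] => []
  | prev, c :: rest =>
      let q := PySem.Chars.strip (PySem.List.slice cs (some (prev : Int)) (some (c : Int)))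
      (if q ≠ [] then [String.ofList q] else []) ++ splitQueriesBuildB cs (c + 1) rest

def split_queries_alt (query_text : String) : List String :=
  let cs := query_text.toList
  splitQueriesBuildB cs 0 (splitQueriesCutsB cs 0 none false none ++ [cs.length])

-- ===== PRECONDITION & SPEC =====
def Spec_split_queries (query_text : String) (out : List String) : Prop := out = split_queries_alt query_text
instance (query_text : String) (out : List String) : Decidable (Spec_split_queries query_text out) := by unfold Spec_split_queries; infer_instance

-- ===== CLAIM (what is proved, stated in full; the proofs are below) =====
def Claim_equal_split_queries : Prop := ∀ (query_text : String), Dom_split_queries query_text → Spec_split_queries query_text (split_queries query_text)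

-- ===== LEMMAS AND PROOFS =====

-- loop invariant: with cur = cs[p:i], A's buffer loop equals B's cut-then-slice result
theorem splitQueries_loop_eq (cs : List Char) :
    ∀ (rest : List Char) (i p : Nat) (prev : Option Char) (inS : Bool) (sc : Option Char)
      (qs : List String), rest = cs.drop i → p ≤ i →
      splitQueriesLoopA rest prev inS sc ((cs.drop p).take (i - p)) qs
        = qs ++ splitQueriesBuildB cs p (splitQueriesCutsB rest i prev inS sc ++ [cs.length]) := by
  intro rest
  induction rest with
  | nil =>
    intro i p prev inS sc qs hrest hpi
    have hlen : cs.length ≤ i := List.drop_eq_nil_iff.mp hrest.symm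
    have hcur : (cs.drop p).take (i - p) = cs.drop p :=
      List.take_of_length_le (by simp; omega)
    have hslice : PySem.List.slice cs (some (p : Int)) (some (cs.length : Int))
        = cs.drop p := by
      rw [PySem.List.slice_natCast]
      exact List.take_of_length_le (by simp)
    simp only [splitQueriesLoopA, splitQueriesCutsB, splitQueriesBuildB, hcur, hslice,
      List.nil_append, List.append_nil]
    split <;> simp
  | cons c rest' ih =>
    intro i p prev inS sc qs hrest hpi
    have hi : i < cs.length := by
      rcases Nat.lt_or_ge i cs.length with h | h
      · exact h
      · rw [List.drop_eq_nil_iff.mpr h] at hrest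
        exact absurd hrest (List.cons_ne_nil _ _)
    have hrest' : rest' = cs.drop (i + 1) := by
      have := congrArg List.tail hrest
      simpa [List.tail_drop] using this
    have hc : cs[i] = c := by
      have h0 : (cs.drop i)[0]'(by simp [hi]) = c := by
        simp only [← hrest]; rfl
      simpa using h0
    have hcurstep : (cs.drop p).take (i - p) ++ [c] = (cs.drop p).take (i + 1 - p) := by
      have hj : i - p < (cs.drop p).length := by simp; omega
      have : (cs.drop p)[i - p]? = some c := by
        rw [List.getElem?_eq_getElem hj, List.getElem_drop]
        have : p + (i - p) = i := by omega
        simp [this, hc]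
      have hsucc := List.take_add_one (l := cs.drop p) (i := i - p)
      rw [this] at hsucc
      have h1 : i + 1 - p = (i - p) + 1 := by omega
      rw [h1, hsucc]
      rfl
    have hslice : PySem.List.slice cs (some (p : Int)) (some (i : Int))
        = (cs.drop p).take (i - p) := PySem.List.slice_natCast ..
    simp only [splitQueriesLoopA, splitQueriesCutsB]
    split_ifs <;>
      first
      | -- accumulate case: the buffer grows by c; apply ih at i+1 with the same p
        (rw [hcurstep]
         exact ih (i + 1) p _ _ _ _ hrest' (by omega))
      | -- semicolon split case: a cut at i; apply ih at i+1 with p := i+1 (empty buffer)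
        (rw [show ([] : List Char) = List.take ((i + 1) - (i + 1)) (List.drop (i + 1) cs) by simp,
             ih (i + 1) (i + 1) _ _ _ _ hrest' (le_refl _)]
         clear ih hrest hcurstep
         simp only [List.cons_append, splitQueriesBuildB, hslice]
         split <;> simp_all)

-- ===== VERDICT (by name: the statement is the Claim_ definition above) =====
theorem split_queries_spec : Claim_equal_split_queries := by
  intro s _
  unfold Spec_split_queries split_queries split_queries_alt
  simpa using splitQueries_loop_eq s.toList s.toList 0 0 none false none [] rfl (le_refl 0)
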